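-- pv_equiv track=rewrite | github.com/chenDeepin/DrugTree | src/backend/etl/drug_etl.py | split_trialbench_names
-- ===== SOURCE A (Python) =====
-- from typing import Optional, Dict, List
--
-- def split_trialbench_names(names_str: str) -> List[str]:
--     parts: List[str] = []
--     current: List[str] = []
--
--     for index, character in enumerate(str(names_str)):
--         if character == ",":
--             previous = names_str[index - 1] if index > 0 else ""
--             following = names_str[index + 1] if index + 1 < len(names_str) else ""
--             if previous.isdigit() and following.isdigit():
--                 current.append(character)
--                 continue
--
--             candidate = "".join(current).strip()
--             if candidate:
--                 parts.append(candidate)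
--             current = []
--             continue
--
--         current.append(character)
--
--     candidate = "".join(current).strip()
--     if candidate:
--         parts.append(candidate)
--
--     return parts
-- ===== SOURCE B (Python) =====
-- from typing import List
--
-- def split_trialbench_names(names_str: str) -> List[str]:
--     # Split on every comma, then re-join the pieces whose separating comma
--     # sits between two digits; no per-character loop or index lookaround.
--     out: List[str] = []
--     pending = None
--     for piece in str(names_str).split(","):
--         if pending is not None and pending[-1:].isdigit() and piece[:1].isdigit():
--             pending = pending + "," + piece
--         else:
--             if pending is not None:
--                 t = pending.strip()
--                 if t:
--                     out.append(t)
--             pending = piece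
--     t = pending.strip()
--     if t:
--         out.append(t)
--     return out
-- ===== Notes on version B (the rewrite author's own statement) =====
-- stated objective: idiomatic
-- what changed: Replaces the per-character index loop with prev/next lookaround by a str.split(",") followed by one pass that re-joins adjacent pieces whose separating comma sits between two digits.
import Mathlib
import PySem

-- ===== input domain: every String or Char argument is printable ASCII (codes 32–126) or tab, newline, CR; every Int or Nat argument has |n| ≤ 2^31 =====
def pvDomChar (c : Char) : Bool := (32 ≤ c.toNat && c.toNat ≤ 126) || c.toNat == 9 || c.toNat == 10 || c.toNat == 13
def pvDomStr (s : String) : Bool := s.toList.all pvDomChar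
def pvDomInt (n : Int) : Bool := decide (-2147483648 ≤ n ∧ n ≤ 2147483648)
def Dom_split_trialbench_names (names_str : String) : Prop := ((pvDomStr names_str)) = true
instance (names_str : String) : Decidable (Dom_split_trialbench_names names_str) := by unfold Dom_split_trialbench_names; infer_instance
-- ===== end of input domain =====

-- B replaces A's per-character index loop (with prev/next lookaround) by split-on-comma
-- plus one merging pass over the pieces; same return value, idiomatic restructuring.

-- ===== PORT A =====
-- loop body of A's `for index, character in enumerate(...)`
def pvStepA (cs : List Char) (st : List String × List Char) (ic : Int × Char) :
    List String × List Char :=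
  let parts := st.1
  let current := st.2
  let index := ic.1
  let character := ic.2
  if character = ',' then
    let previous : List Char :=
      if index > 0 then ((PySem.List.pyGet? cs (index - 1)).elim [] (fun c => [c])) else []
    let following : List Char :=
      if index + 1 < (cs.length : Int) then
        ((PySem.List.pyGet? cs (index + 1)).elim [] (fun c => [c])) else []
    if PySem.Chars.strIsdigit previous && PySem.Chars.strIsdigit following then
      (parts, current ++ [character])
    else
      let candidate := PySem.Chars.strip current
      (if candidate ≠ [] then parts ++ [String.ofList candidate] else parts, [])
  else
    (parts, current ++ [character])

-- trailing `candidate = "".join(current).strip(); if candidate: parts.append(candidate)`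
def pvFlushA (st : List String × List Char) : List String :=
  let candidate := PySem.Chars.strip st.2
  if candidate ≠ [] then st.1 ++ [String.ofList candidate] else st.1

def split_trialbench_names (names_str : String) : List String :=
  let cs := names_str.toList
  pvFlushA ((PySem.List.enumerate cs).foldl (pvStepA cs) ([], []))

-- ===== PORT B =====
-- loop body of B's `for piece in str(names_str).split(",")`
def pvStepB (st : List String × Option (List Char)) (piece : List Char) :
    List String × Option (List Char) :=
  let out := st.1
  match st.2 with
  | some pending =>
    if PySem.Chars.strIsdigit (PySem.Chars.slice pending (some (-1)) none) &&
       PySem.Chars.strIsdigit (PySem.Chars.slice piece none (some 1)) then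
      (out, some (pending ++ ',' :: piece))
    else
      let t := PySem.Chars.strip pending
      (if t ≠ [] then out ++ [String.ofList t] else out, some piece)
  | none => (out, some piece)

-- trailing `t = pending.strip(); if t: out.append(t)`  (pending is never None: split ≥ 1 piece)
def pvFlushB (st : List String × Option (List Char)) : List String :=
  match st.2 with
  | some pending =>
    let t := PySem.Chars.strip pending
    if t ≠ [] then st.1 ++ [String.ofList t] else st.1
  | none => st.1

def split_trialbench_names_alt (names_str : String) : List String :=
  pvFlushB ((PySem.Chars.splitOn names_str.toList [',']).foldl pvStepB ([], none))

-- ===== PRECONDITION & SPEC =====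
def Spec_split_trialbench_names (names_str : String) (out : List String) : Prop := out = split_trialbench_names_alt names_str
instance (names_str : String) (out : List String) : Decidable (Spec_split_trialbench_names names_str out) := by unfold Spec_split_trialbench_names; infer_instance

-- ===== CLAIM (what is proved, stated in full; the proofs are below) =====
def Claim_equal_split_trialbench_names : Prop := ∀ (names_str : String), Dom_split_trialbench_names names_str → Spec_split_trialbench_names names_str (split_trialbench_names names_str)

-- ===== LEMMAS AND PROOFS =====

-- is the last character a digit?  ( = `p[-1:].isdigit()` )
def pvDLast (p : List Char) : Bool :=
  PySem.Chars.strIsdigit (PySem.Chars.slice p (some (-1)) none)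

-- is the first character a digit?
def pvDHead (p : List Char) : Bool :=
  match p.head? with
  | some c => PySem.Chars.isdigit c
  | none => false

-- reference segmentation: split at commas not flanked by digits on both sides
def pvSegs (cur : List Char) : List Char → List (List Char)
  | [] => [cur]
  | c :: rest =>
    if c = ',' then
      if pvDLast cur && pvDHead rest then pvSegs (cur ++ [c]) rest
      else cur :: pvSegs [] rest
    else pvSegs (cur ++ [c]) rest

-- strip every segment, drop the empty ones
def pvPost (xs : List (List Char)) : List String :=
  xs.filterMap (fun p =>
    let t := PySem.Chars.strip p
    if t ≠ [] then some (String.ofList t) else none)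

-- structural recursion equivalent of splitOn · [',']
def pvSplit : List Char → List (List Char)
  | [] => [[]]
  | c :: rest => if c = ',' then [] :: pvSplit rest else (pvSplit rest).modifyHead (c :: ·)

def pvFlat (qs : List (List Char)) : List Char := (qs.map (',' :: ·)).flatten

theorem pvSplit_ne_nil (cs : List Char) : pvSplit cs ≠ [] := by
  cases cs with
  | nil => simp [pvSplit]
  | cons c rest => simp only [pvSplit]; split <;> simp [List.modifyHead_eq_nil_iff, pvSplit_ne_nil rest]

theorem pvSplit_go (fuel : Nat) : ∀ (l cur : List Char) (acc : List (List Char)), l.length < fuel →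
    PySem.Chars.splitOn.go [','] fuel l cur acc
      = acc.reverse ++ (pvSplit l).modifyHead (cur.reverse ++ ·) := by
  induction fuel with
  | zero => intro l cur acc h; omega
  | succ n ih =>
    intro l cur acc h
    cases l with
    | nil => simp [PySem.Chars.splitOn.go, pvSplit]
    | cons c rest =>
      simp only [PySem.Chars.splitOn.go]
      by_cases hc : c = ','
      · subst hc
        have hpre : List.isPrefixOf [','] (',' :: rest) = true := by simp [List.isPrefixOf]
        rw [if_pos hpre]
        simp only [List.length_cons, List.length_nil, List.drop_succ_cons, List.drop_zero]
        rw [ih rest [] ((cur.reverse) :: acc) (by simpa using Nat.lt_of_succ_lt_succ h)]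
        simp only [pvSplit]
        cases pvSplit rest with
        | nil => simp
        | cons q qs => simp
      · have hpre : List.isPrefixOf [','] (c :: rest) = false := by
          simp [List.isPrefixOf]; exact fun h => absurd h.symm hc
        rw [if_neg (by simp [hpre])]
        rw [ih rest (c :: cur) acc (by simpa using Nat.lt_of_succ_lt_succ h)]
        simp only [pvSplit, if_neg hc]
        cases hp : pvSplit rest with
        | nil => exact absurd hp (pvSplit_ne_nil rest)
        | cons q qs => simp

theorem splitOn_eq_pvSplit (cs : List Char) :
    PySem.Chars.splitOn cs [','] = pvSplit cs := by
  rw [PySem.Chars.splitOn, pvSplit_go (cs.length + 1) cs [] [] (by omega)]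
  cases h : pvSplit cs with
  | nil => exact absurd h (pvSplit_ne_nil cs)
  | cons q qs => simp

-- reconstruction: the split pieces, re-joined with commas, are the input
theorem pvSplit_flat : ∀ (cs q : List Char) (qs : List (List Char)),
    pvSplit cs = q :: qs → q ++ pvFlat qs = cs := by
  intro cs
  induction cs with
  | nil => intro q qs h; simp [pvSplit] at h; simp [h.1, h.2, pvFlat]
  | cons c rest ih =>
    intro q qs h
    simp only [pvSplit] at h
    by_cases hc : c = ','
    · rw [if_pos hc] at h
      cases hp : pvSplit rest with
      | nil => exact absurd hp (pvSplit_ne_nil rest)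
      | cons q' qs' =>
        rw [hp] at h
        obtain ⟨h1, h2⟩ := List.cons.injEq .. ▸ h
        subst h1; subst h2; subst hc
        simpa [pvFlat] using congrArg (List.cons ',') (ih q' qs' hp)
    · rw [if_neg hc] at h
      cases hp : pvSplit rest with
      | nil => exact absurd hp (pvSplit_ne_nil rest)
      | cons q' qs' =>
        rw [hp] at h
        simp only [List.modifyHead_cons] at h
        obtain ⟨h1, h2⟩ := List.cons.injEq .. ▸ h
        subst h1; subst h2
        simpa using congrArg (c :: ·) (ih q' qs' hp)

-- no piece produced by the split contains a comma
theorem pvSplit_nocomma : ∀ (cs : List Char), ∀ p ∈ pvSplit cs, ',' ∉ p := by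
  intro cs
  induction cs with
  | nil => intro p hp; simp [pvSplit] at hp; simp [hp]
  | cons c rest ih =>
    intro p hp
    simp only [pvSplit] at hp
    by_cases hc : c = ','
    · rw [if_pos hc] at hp
      rcases List.mem_cons.mp hp with h | h
      · simp [h]
      · exact ih p h
    · rw [if_neg hc] at hp
      cases hq : pvSplit rest with
      | nil => exact absurd hq (pvSplit_ne_nil rest)
      | cons q' qs' =>
        rw [hq, List.modifyHead_cons] at hp
        rcases List.mem_cons.mp hp with h | h
        · subst h
          intro hmem
          rcases List.mem_cons.mp hmem with h | h
          · exact hc h.symm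
          · exact ih q' (hq ▸ List.mem_cons_self ..) h
        · exact ih p (hq ▸ List.mem_cons_of_mem _ h)

-- pvDLast / pvDHead bridges
theorem pvDLast_concat (xs : List Char) (c : Char) :
    pvDLast (xs ++ [c]) = PySem.Chars.isdigit c := by
  simp [pvDLast, pysem, PySem.Chars.strIsdigit]

theorem isdigit_comma : PySem.Chars.isdigit ',' = false := by decide

theorem strIsdigit_take_one (q : List Char) :
    PySem.Chars.strIsdigit (PySem.Chars.slice q none (some 1)) = pvDHead q := by
  have h : PySem.Chars.slice q none (some 1) = q.take 1 := by simp [pysem]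
  rw [h]
  cases q with
  | nil => decide
  | cons c rest => simp [pvDHead, PySem.Chars.strIsdigit]

theorem pvDHead_flat (qs : List (List Char)) : pvDHead (pvFlat qs) = false := by
  cases qs with
  | nil => decide
  | cons q qs => simp [pvFlat, pvDHead, isdigit_comma]

theorem pvDHead_append_flat (q : List Char) (qs : List (List Char)) :
    pvDHead (q ++ pvFlat qs) = PySem.Chars.strIsdigit (PySem.Chars.slice q none (some 1)) := by
  rw [strIsdigit_take_one]
  cases q with
  | nil => simpa using pvDHead_flat qs
  | cons c rest => simp [pvDHead]

-- pvSegs equation lemmas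
theorem pvSegs_nil (cur : List Char) : pvSegs cur [] = [cur] := rfl

theorem pvSegs_comma (cur rest : List Char) :
    pvSegs cur (',' :: rest)
      = if pvDLast cur && pvDHead rest then pvSegs (cur ++ [',']) rest
        else cur :: pvSegs [] rest := by
  simp [pvSegs]

theorem pvSegs_other (cur rest : List Char) (c : Char) (hc : c ≠ ',') :
    pvSegs cur (c :: rest) = pvSegs (cur ++ [c]) rest := by
  simp [pvSegs, hc]

-- pvSegs just accumulates a comma-free prefix
theorem pvSegs_nocomma : ∀ (q cur rest : List Char), ',' ∉ q →
    pvSegs cur (q ++ rest) = pvSegs (cur ++ q) rest := by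
  intro q
  induction q with
  | nil => intro cur rest _; simp
  | cons c q' ih =>
    intro cur rest hq
    have hc : c ≠ ',' := fun h => hq (h ▸ List.mem_cons_self ..)
    rw [List.cons_append, pvSegs_other _ _ _ hc,
      ih (cur ++ [c]) rest (fun h => hq (List.mem_cons_of_mem _ h))]
    simp

theorem pvPost_cons (p : List Char) (xs : List (List Char)) :
    pvPost (p :: xs)
      = (if PySem.Chars.strip p ≠ [] then [String.ofList (PySem.Chars.strip p)] else []) ++ pvPost xs := by
  simp only [pvPost, List.filterMap_cons]
  split_ifs with h
  · simp_all
  · simp_all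

-- ===== the B side =====
theorem B_fold : ∀ (qs : List (List Char)) (out : List String) (p : List Char),
    (∀ q ∈ qs, ',' ∉ q) →
    pvFlushB (qs.foldl pvStepB (out, some p)) = out ++ pvPost (pvSegs p (pvFlat qs)) := by
  intro qs
  induction qs with
  | nil =>
    intro out p _
    show pvFlushB (out, some p) = out ++ pvPost (pvSegs p (pvFlat []))
    rw [show pvFlat [] = [] from rfl, pvSegs_nil, pvPost_cons]
    show (if PySem.Chars.strip p ≠ [] then out ++ [String.ofList (PySem.Chars.strip p)] else out) = _
    split_ifs <;> simp [pvPost]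
  | cons q qs' ih =>
    intro out p hq
    have hqhead : ',' ∉ q := hq q (List.mem_cons_self ..)
    have hqtail : ∀ r ∈ qs', ',' ∉ r := fun r hr => hq r (List.mem_cons_of_mem _ hr)
    rw [show pvFlat (q :: qs') = ',' :: (q ++ pvFlat qs') from by simp [pvFlat]]
    rw [pvSegs_comma, pvDHead_append_flat]
    rw [List.foldl_cons]
    show pvFlushB (List.foldl pvStepB
        (if (PySem.Chars.strIsdigit (PySem.Chars.slice p (some (-1)) none) &&
             PySem.Chars.strIsdigit (PySem.Chars.slice q none (some 1))) = true
         then (out, some (p ++ ',' :: q))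
         else (if PySem.Chars.strip p ≠ [] then out ++ [String.ofList (PySem.Chars.strip p)] else out,
               some q)) qs') = _
    rw [show PySem.Chars.strIsdigit (PySem.Chars.slice p (some (-1)) none) = pvDLast p from rfl]
    by_cases hcond : (pvDLast p && PySem.Chars.strIsdigit (PySem.Chars.slice q none (some 1))) = true
    · rw [if_pos hcond, if_pos hcond]
      rw [ih out (p ++ ',' :: q) hqtail]
      rw [show p ++ ',' :: q = (p ++ [',']) ++ q from by simp]
      rw [pvSegs_nocomma q (p ++ [',']) (pvFlat qs') hqhead]
    · rw [if_neg hcond, if_neg hcond]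
      rw [ih _ q hqtail]
      rw [show pvSegs ([] : List Char) (q ++ pvFlat qs') = pvSegs q (pvFlat qs') from
        by simpa using pvSegs_nocomma q [] (pvFlat qs') hqhead]
      rw [pvPost_cons]
      split_ifs <;> simp

-- ===== the A side =====
-- the `previous` expression in A tests the last character of the prefix already consumed
theorem prev_digit (cs pre tail : List Char) (h : cs = pre ++ tail) :
    PySem.Chars.strIsdigit
      (if ((pre.length : Nat) : Int) > 0 then
        ((PySem.List.pyGet? cs (((pre.length : Nat) : Int) - 1)).elim ([] : List Char) (fun c => [c]))
      else []) = pvDLast pre := by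
  rcases List.eq_nil_or_concat pre with hn | ⟨xs, a, hn⟩
  · subst hn
    rw [if_neg (by simp)]
    decide
  · rw [List.concat_eq_append] at hn
    subst hn; subst h
    rw [if_pos (by simp)]
    have h1 : (((xs ++ [a]).length : Nat) : Int) - 1 = ((xs.length : Nat) : Int) := by simp
    rw [h1, PySem.List.pyGet?_natCast]
    rw [show ((xs ++ [a]) ++ tail)[xs.length]? = some a from by
      rw [List.getElem?_append_left (by simp)]; simp]
    rw [pvDLast_concat]
    simp [PySem.Chars.strIsdigit]

-- the `following` expression in A tests the first character after the comma
theorem foll_digit (cs pre rest' : List Char) (h : cs = pre ++ ',' :: rest') :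
    PySem.Chars.strIsdigit
      (if ((pre.length : Nat) : Int) + 1 < ((cs.length : Nat) : Int) then
        ((PySem.List.pyGet? cs (((pre.length : Nat) : Int) + 1)).elim ([] : List Char) (fun c => [c]))
      else []) = pvDHead rest' := by
  subst h
  cases rest' with
  | nil =>
    rw [if_neg (by simp)]
    decide
  | cons d t =>
    rw [if_pos (by simp)]
    have h1 : ((pre.length : Nat) : Int) + 1 = (((pre.length + 1 : Nat)) : Int) := by push_cast; ring
    rw [h1, PySem.List.pyGet?_natCast]
    rw [show (pre ++ ',' :: d :: t)[pre.length + 1]? = some d from by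
      rw [List.getElem?_append_right (by omega)]; simp]
    simp [pvDHead, PySem.Chars.strIsdigit]

theorem pvDLast_nil : pvDLast [] = false := by decide

theorem A_fold : ∀ (rest cs pre : List Char) (parts : List String) (current : List Char),
    cs = pre ++ rest → pvDLast current = pvDLast pre →
    pvFlushA ((PySem.List.enumerate rest ((pre.length : Nat) : Int)).foldl (pvStepA cs) (parts, current))
      = parts ++ pvPost (pvSegs current rest) := by
  intro rest
  induction rest with
  | nil =>
    intro cs pre parts current hcs hinv
    show pvFlushA (parts, current) = parts ++ pvPost (pvSegs current [])
    rw [pvSegs_nil, pvPost_cons]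
    show (if PySem.Chars.strip current ≠ [] then parts ++ [String.ofList (PySem.Chars.strip current)] else parts) = _
    split_ifs <;> simp [pvPost]
  | cons c rest' ih =>
    intro cs pre parts current hcs hinv
    rw [PySem.List.enumerate_cons, List.foldl_cons]
    by_cases hc : c = ','
    case neg =>
      have hstep : pvStepA cs (parts, current) (((pre.length : Nat) : Int), c)
          = (parts, current ++ [c]) := by
        simp [pvStepA, hc]
      rw [hstep]
      have hlen : (((pre.length : Nat) : Int) + 1) = (((pre ++ [c]).length : Nat) : Int) := by
        simp
      rw [hlen, ih cs (pre ++ [c]) parts (current ++ [c]) (by simp [hcs])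
            (by rw [pvDLast_concat, pvDLast_concat])]
      rw [pvSegs_other _ _ _ hc]
    case pos =>
      subst hc
      have hstep : pvStepA cs (parts, current) (((pre.length : Nat) : Int), ',')
          = (if pvDLast current && pvDHead rest' then (parts, current ++ [','])
             else (if PySem.Chars.strip current ≠ []
                   then parts ++ [String.ofList (PySem.Chars.strip current)] else parts, [])) := by
        simp only [pvStepA, if_true]
        rw [prev_digit cs pre (',' :: rest') hcs, foll_digit cs pre rest' hcs, ← hinv]
      rw [hstep, pvSegs_comma]
      by_cases hcond : (pvDLast current && pvDHead rest') = true
      · rw [if_pos hcond, if_pos hcond]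
        have hlen : (((pre.length : Nat) : Int) + 1) = (((pre ++ [',']).length : Nat) : Int) := by
          simp
        rw [hlen, ih cs (pre ++ [',']) parts (current ++ [',']) (by simp [hcs])
              (by rw [pvDLast_concat, pvDLast_concat])]
      · rw [if_neg hcond, if_neg hcond]
        have hlen : (((pre.length : Nat) : Int) + 1) = (((pre ++ [',']).length : Nat) : Int) := by
          simp
        rw [hlen, ih cs (pre ++ [',']) _ [] (by simp [hcs])
              (by rw [pvDLast_nil, pvDLast_concat, isdigit_comma])]
        rw [pvPost_cons]
        split_ifs <;> simp

-- ===== VERDICT (by name: the statement is the Claim_ definition above) =====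
theorem split_trialbench_names_spec : Claim_equal_split_trialbench_names := by
  unfold Claim_equal_split_trialbench_names
  intro s _
  unfold Spec_split_trialbench_names split_trialbench_names split_trialbench_names_alt
  have hA : pvFlushA ((PySem.List.enumerate s.toList).foldl (pvStepA s.toList) ([], []))
      = pvPost (pvSegs [] s.toList) := by
    have h := A_fold s.toList s.toList [] [] [] (by simp) rfl
    simpa using h
  rw [hA, splitOn_eq_pvSplit s.toList]
  cases hq : pvSplit s.toList with
  | nil => exact absurd hq (pvSplit_ne_nil _)
  | cons q qs =>
    rw [List.foldl_cons]
    rw [show pvStepB ([], none) q = (([] : List String), some q) from rfl]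
    rw [B_fold qs [] q (fun r hr => pvSplit_nocomma s.toList r (by rw [hq]; exact List.mem_cons_of_mem _ hr))]
    have hq0 : ',' ∉ q := pvSplit_nocomma s.toList q (by rw [hq]; exact List.mem_cons_self ..)
    rw [show pvSegs q (pvFlat qs) = pvSegs ([] ++ q) (pvFlat qs) from by simp,
        ← pvSegs_nocomma q [] (pvFlat qs) hq0,
        pvSplit_flat s.toList q qs hq]
    simp
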